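-- pv_equiv track=rewrite | github.com/Joecth/leetcode_3rd_vscode | 475.heaters.py | is_valid_radius_my_TLE
-- ===== SOURCE A (Python) =====
-- def is_valid_radius_my_TLE(r, houses, heaters):
--     for house in houses:
--         not_ok = 0
--         for heater in heaters:
--             if abs(house - heater) <= r:
--                 break
--             else:
--                 not_ok += 1
--
--             if not_ok == len(heaters):
--                 return False
--     return True
-- ===== SOURCE B (Python) =====
-- def is_valid_radius_my_TLE(r, houses, heaters):
--     hs = sorted(heaters)
--     for house in houses:
--         lo, hi = 0, len(hs)
--         while lo < hi:
--             mid = (lo + hi) // 2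
--             if hs[mid] < house:
--                 lo = mid + 1
--             else:
--                 hi = mid
--         near = False
--         if lo < len(hs) and hs[lo] - house <= r:
--             near = True
--         if lo > 0 and house - hs[lo - 1] <= r:
--             near = True
--         if not near:
--             return False
--     return True
-- ===== Notes on version B (the rewrite author's own statement) =====
-- stated objective: faster
-- what changed: Replaced the per-house linear scan over all heaters (with a not_ok counter) by sorting the heaters once and binary-searching the nearest heater for each house.
-- intended difference: When heaters is empty but houses is not, A's not_ok counter can never reach len(heaters)==0 after an increment so A returns True although no house is covered; B returns False, which is the intended answer. — e.g. on is_valid_radius_my_TLE(0, [1], []): A returns true, B returns false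
import Mathlib
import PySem

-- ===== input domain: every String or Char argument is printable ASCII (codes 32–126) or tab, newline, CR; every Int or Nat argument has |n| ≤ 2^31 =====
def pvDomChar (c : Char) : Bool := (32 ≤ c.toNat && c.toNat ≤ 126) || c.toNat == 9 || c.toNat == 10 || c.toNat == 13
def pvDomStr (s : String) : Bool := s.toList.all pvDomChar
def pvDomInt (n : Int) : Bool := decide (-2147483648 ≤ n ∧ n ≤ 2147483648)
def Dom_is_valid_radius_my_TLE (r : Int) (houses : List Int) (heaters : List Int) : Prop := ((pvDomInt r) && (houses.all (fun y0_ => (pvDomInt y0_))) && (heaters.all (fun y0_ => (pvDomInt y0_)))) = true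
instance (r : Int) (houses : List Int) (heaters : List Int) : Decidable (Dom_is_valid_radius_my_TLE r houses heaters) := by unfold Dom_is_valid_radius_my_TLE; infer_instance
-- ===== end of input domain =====

-- B replaces A's per-house linear scan of all heaters by sorting the heaters once
-- and binary-searching the nearest heater per house (objective: faster, asymptotic).

-- ===== PORT A =====
-- inner 'for heater in heaters' loop with the not_ok counter:
-- 'none' = loop left by break or exhaustion (outer loop continues), 'some false' = 'return False'
def pvLoopHeatersA (r house n : Int) (notok : Int) : List Int → Option Bool
  | [] => none
  | k :: rest =>
      if |house - k| ≤ r then none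
      else
        let notok' := notok + 1
        if notok' = n then some false else pvLoopHeatersA r house n notok' rest

-- outer 'for house in houses' loop
def pvLoopHousesA (r : Int) (heaters : List Int) : List Int → Bool
  | [] => true
  | h :: t =>
      match pvLoopHeatersA r h (heaters.length : Int) 0 heaters with
      | some b => b
      | none => pvLoopHousesA r heaters t

def is_valid_radius_my_TLE (r : Int) (houses : List Int) (heaters : List Int) : Bool :=
  pvLoopHousesA r heaters houses

-- ===== PORT B =====
-- the hand-written 'while lo < hi' bisect_left loop of Source B
def pvBisectB (hs : List Int) (house : Int) (lo hi : Nat) : Nat :=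
  if lo < hi then
    let mid := (lo + hi) / 2
    if hs.getD mid 0 < house then pvBisectB hs house (mid + 1) hi
    else pvBisectB hs house lo mid
  else lo
termination_by hi - lo
decreasing_by all_goals omega

-- one iteration of the 'for house in houses' loop body of Source B
def pvCheckHouseB (r : Int) (hs : List Int) (house : Int) : Bool :=
  let lo := pvBisectB hs house 0 hs.length
  let near := false
  let near := if lo < hs.length ∧ hs.getD lo 0 - house ≤ r then true else near
  let near := if 0 < lo ∧ house - hs.getD (lo - 1) 0 ≤ r then true else near
  near

def pvLoopHousesB (r : Int) (hs : List Int) : List Int → Bool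
  | [] => true
  | h :: t => if !(pvCheckHouseB r hs h) then false else pvLoopHousesB r hs t

def is_valid_radius_my_TLE_alt (r : Int) (houses : List Int) (heaters : List Int) : Bool :=
  pvLoopHousesB r (PySem.List.sorted heaters (fun x => x) false) houses

-- ===== PRECONDITION & SPEC =====
-- When heaters is empty but houses is not, A's not_ok counter can never reach
-- len(heaters) == 0 after an increment, so A returns True although no house is
-- covered; B returns False, which is the intended answer.
def D_is_valid_radius_my_TLE (r : Int) (houses : List Int) (heaters : List Int) : Prop :=
  heaters = [] ∧ houses ≠ []
instance (r : Int) (houses : List Int) (heaters : List Int) : Decidable (D_is_valid_radius_my_TLE r houses heaters) := by unfold D_is_valid_radius_my_TLE; infer_instance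

def Spec_is_valid_radius_my_TLE (r : Int) (houses : List Int) (heaters : List Int) (out : Bool) : Prop := ¬ D_is_valid_radius_my_TLE r houses heaters → out = is_valid_radius_my_TLE_alt r houses heaters
instance (r : Int) (houses : List Int) (heaters : List Int) (out : Bool) : Decidable (Spec_is_valid_radius_my_TLE r houses heaters out) := by unfold Spec_is_valid_radius_my_TLE; infer_instance

def pvDiffWitness_is_valid_radius_my_TLE : Int × List Int × List Int := (0, [1], [])
def pvDiffWitnessOut_is_valid_radius_my_TLE : Bool × Bool := (true, false)

-- ===== CLAIM (what is proved, stated in full; the proofs are below) =====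
def Claim_unchanged_is_valid_radius_my_TLE : Prop := ∀ (r : Int) (houses : List Int) (heaters : List Int), Dom_is_valid_radius_my_TLE r houses heaters → Spec_is_valid_radius_my_TLE r houses heaters (is_valid_radius_my_TLE r houses heaters)
def Claim_changed_is_valid_radius_my_TLE : Prop := Dom_is_valid_radius_my_TLE (pvDiffWitness_is_valid_radius_my_TLE.1) (pvDiffWitness_is_valid_radius_my_TLE.2.1) (pvDiffWitness_is_valid_radius_my_TLE.2.2) ∧ D_is_valid_radius_my_TLE (pvDiffWitness_is_valid_radius_my_TLE.1) (pvDiffWitness_is_valid_radius_my_TLE.2.1) (pvDiffWitness_is_valid_radius_my_TLE.2.2) ∧ is_valid_radius_my_TLE (pvDiffWitness_is_valid_radius_my_TLE.1) (pvDiffWitness_is_valid_radius_my_TLE.2.1) (pvDiffWitness_is_valid_radius_my_TLE.2.2) = pvDiffWitnessOut_is_valid_radius_my_TLE.1 ∧ is_valid_radius_my_TLE_alt (pvDiffWitness_is_valid_radius_my_TLE.1) (pvDiffWitness_is_valid_radius_my_TLE.2.1) (pvDiffWitness_is_valid_radius_my_TLE.2.2) = pvDiffWitnessOut_is_valid_radius_my_TLE.2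 ∧ pvDiffWitnessOut_is_valid_radius_my_TLE.1 ≠ pvDiffWitnessOut_is_valid_radius_my_TLE.2
def Claim_exact_is_valid_radius_my_TLE : Prop := ∀ (r : Int) (houses : List Int) (heaters : List Int), Dom_is_valid_radius_my_TLE r houses heaters → D_is_valid_radius_my_TLE r houses heaters → is_valid_radius_my_TLE r houses heaters ≠ is_valid_radius_my_TLE_alt r houses heaters

-- ===== LEMMAS AND PROOFS =====

-- A's inner loop returns 'some false' exactly when no heater covers and the counter ran out
theorem pvLoopHeatersA_eq (r house n notok : Int) (rest : List Int)
    (hn : notok + rest.length ≤ n) :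
    pvLoopHeatersA r house n notok rest =
      if rest.any (fun k => decide (|house - k| ≤ r)) then none
      else if rest ≠ [] ∧ notok + rest.length = n then some false else none := by
  induction rest generalizing notok with
  | nil => simp [pvLoopHeatersA]
  | cons k rest ih =>
    simp only [pvLoopHeatersA, List.any_cons, List.length_cons]
    by_cases hc : |house - k| ≤ r
    · simp [hc]
    · simp only [hc, decide_false, Bool.false_or]
      by_cases hstop : notok + 1 = n
      · have hrest : rest = [] := by
          cases rest with
          | nil => rfl
          | cons a t => exfalso; simp [List.length_cons] at hn; omega
        subst hrest
        simp [hstop]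
      · have hn' : notok + 1 + (rest.length : Int) ≤ n := by
          simp only [List.length_cons] at hn; push_cast at hn ⊢; omega
        rw [if_neg hstop, ih _ hn']
        by_cases hany : rest.any (fun k => decide (|house - k| ≤ r)) = true
        · simp [hany]
        · simp only [hany, if_false, Bool.false_eq_true]
          by_cases hr : rest = []
          · subst hr; simp; omega
          · rcases eq_or_ne (notok + 1 + (rest.length : Int)) n with hcond | hcond
            · rw [if_pos ⟨hr, hcond⟩, if_pos ⟨List.cons_ne_nil k rest, by push_cast; omega⟩]
            · rw [if_neg (fun h => hcond h.2),
                if_neg (fun h => hcond (by have h2 := h.2; push_cast at h2; omega))]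

theorem pvLoopHousesA_eq (r : Int) (heaters : List Int) (hne : heaters ≠ []) (houses : List Int) :
    pvLoopHousesA r heaters houses =
      houses.all (fun h => heaters.any (fun k => decide (|h - k| ≤ r))) := by
  induction houses with
  | nil => rfl
  | cons h t ih =>
    simp only [pvLoopHousesA, List.all_cons]
    rw [pvLoopHeatersA_eq r h _ 0 heaters (by omega)]
    by_cases hany : heaters.any (fun k => decide (|h - k| ≤ r)) = true
    · simp [hany, ih]
    · simp [hany, hne]

theorem pvLoopHousesA_nil (r : Int) (houses : List Int) :
    pvLoopHousesA r [] houses = true := by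
  induction houses with
  | nil => rfl
  | cons h t ih => simpa [pvLoopHousesA, pvLoopHeatersA] using ih

-- characterisation of the bisect_left loop on a sorted list
theorem pvBisectB_spec (hs : List Int) (house : Int) (hsort : hs.Pairwise (· ≤ ·)) (lo hi : Nat)
    (hle : lo ≤ hi) (hhi : hi ≤ hs.length)
    (hbelow : ∀ i, i < lo → ∀ (h : i < hs.length), hs[i] < house)
    (habove : ∀ i, hi ≤ i → ∀ (h : i < hs.length), house ≤ hs[i]) :
    lo ≤ pvBisectB hs house lo hi ∧ pvBisectB hs house lo hi ≤ hi ∧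
    (∀ i, i < pvBisectB hs house lo hi → ∀ (h : i < hs.length), hs[i] < house) ∧
    (∀ i, pvBisectB hs house lo hi ≤ i → ∀ (h : i < hs.length), house ≤ hs[i]) := by
  have hmono := List.pairwise_iff_getElem.mp hsort
  induction lo, hi using pvBisectB.induct hs house with
  | case1 lo hi hlt mid hmidlt ih =>
    have hmid2 : mid = (lo + hi) / 2 := rfl
    have hmid : mid < hs.length := by omega
    have hmidlt' : hs[mid] < house := by rwa [List.getD_eq_getElem hs 0 hmid] at hmidlt
    have hstep : pvBisectB hs house lo hi = pvBisectB hs house (mid + 1) hi := by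
      rw [pvBisectB, if_pos hlt]
      show (if hs.getD mid 0 < house then pvBisectB hs house (mid + 1) hi
            else pvBisectB hs house lo mid) = _
      rw [if_pos hmidlt]
    have hb : ∀ i, i < mid + 1 → ∀ (h : i < hs.length), hs[i] < house := by
      intro i hi' h
      rcases Nat.lt_or_ge i lo with h1 | h1
      · exact hbelow i h1 h
      · rcases Nat.lt_or_ge i mid with h2 | h2
        · exact lt_of_le_of_lt (hmono i mid h hmid h2) hmidlt'
        · have : i = mid := by omega
          subst this; exact hmidlt'
    have hres := ih (by omega) hhi hb habove
    rw [hstep]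
    exact ⟨by omega, hres.2.1, hres.2.2.1, hres.2.2.2⟩
  | case2 lo hi hlt mid hmidge ih =>
    have hmid2 : mid = (lo + hi) / 2 := rfl
    have hmid : mid < hs.length := by omega
    have hmidge' : house ≤ hs[mid] := by
      rw [List.getD_eq_getElem hs 0 hmid] at hmidge; omega
    have hstep : pvBisectB hs house lo hi = pvBisectB hs house lo mid := by
      rw [pvBisectB, if_pos hlt]
      show (if hs.getD mid 0 < house then pvBisectB hs house (mid + 1) hi
            else pvBisectB hs house lo mid) = _
      rw [if_neg hmidge]
    have ha : ∀ i, mid ≤ i → ∀ (h : i < hs.length), house ≤ hs[i] := by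
      intro i hi' h
      rcases Nat.lt_or_ge mid i with h3 | h3
      · exact le_trans hmidge' (hmono mid i hmid h h3)
      · have : i = mid := by omega
        subst this; exact hmidge'
    have hres := ih (by omega) (by omega) hbelow ha
    rw [hstep]
    exact ⟨hres.1, by omega, hres.2.2.1, hres.2.2.2⟩
  | case3 lo hi hge =>
    rw [pvBisectB, if_neg hge]
    exact ⟨le_refl _, by omega, hbelow, fun i hi' h => habove i (by omega) h⟩

theorem pvCheckHouseB_iff (r house : Int) (hs : List Int)
    (hsort : hs.Pairwise (· ≤ ·)) :
    pvCheckHouseB r hs house = hs.any (fun k => decide (|house - k| ≤ r)) := by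
  have hmono := List.pairwise_iff_getElem.mp hsort
  obtain ⟨-, hle, hlt, hge⟩ := pvBisectB_spec hs house hsort 0 hs.length (by omega) le_rfl
    (fun i hi h => absurd hi (by omega)) (fun i hge h => absurd h (by omega))
  unfold pvCheckHouseB
  set lo := pvBisectB hs house 0 hs.length with hlodef
  show (if 0 < lo ∧ house - hs.getD (lo - 1) 0 ≤ r then true
        else if lo < hs.length ∧ hs.getD lo 0 - house ≤ r then true else false) =
      hs.any (fun k => decide (|house - k| ≤ r))
  by_cases hany : hs.any (fun k => decide (|house - k| ≤ r)) = true
  · rw [hany]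
    obtain ⟨k, hk, hcov⟩ := List.any_eq_true.mp hany
    obtain ⟨i, hilen, rfl⟩ := List.mem_iff_getElem.mp hk
    rw [decide_eq_true_eq] at hcov
    rcases Nat.lt_or_ge i lo with h1 | h1
    · -- a covering heater left of the insertion point → the lo-1 branch fires
      have h0 : 0 < lo := by omega
      have hl1 : lo - 1 < hs.length := by omega
      have hfar : house - hs[lo - 1] ≤ r := by
        have h2 : hs[i] ≤ hs[lo - 1] := by
          rcases Nat.lt_or_ge i (lo - 1) with h3 | h3
          · exact hmono i (lo - 1) hilen hl1 h3
          · have : i = lo - 1 := by omega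
            subst this; exact le_refl _
        have := le_abs_self (house - hs[i])
        omega
      simp only [List.getD_eq_getElem hs 0 hl1]
      rw [if_pos ⟨h0, hfar⟩]
    · -- a covering heater at or right of the insertion point → the lo branch fires
      have hlolen : lo < hs.length := by omega
      have hfar : hs.getD lo 0 - house ≤ r := by
        rw [List.getD_eq_getElem hs 0 hlolen]
        have h2 : hs[lo] ≤ hs[i] := by
          rcases Nat.lt_or_ge lo i with h3 | h3
          · exact hmono lo i hlolen hilen h3
          · have : i = lo := by omega
            subst this; exact le_refl _
        have := neg_le_abs (house - hs[i])
        omega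
      by_cases h2 : 0 < lo ∧ house - hs.getD (lo - 1) 0 ≤ r
      · rw [if_pos h2]
      · rw [if_neg h2, if_pos ⟨hlolen, hfar⟩]
  · rw [Bool.eq_false_iff.mpr hany]
    have hno : ∀ k ∈ hs, ¬(|house - k| ≤ r) := by
      intro k hk hcov
      exact hany (List.any_eq_true.mpr ⟨k, hk, decide_eq_true hcov⟩)
    rw [if_neg, if_neg]
    · rintro ⟨h0, hfar⟩
      have hlolen : lo < hs.length := h0
      rw [List.getD_eq_getElem hs 0 hlolen] at hfar
      have hh : house ≤ hs[lo] := hge lo (le_refl _) hlolen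
      exact hno hs[lo] (List.getElem_mem hlolen) (by rw [abs_of_nonpos (by omega)]; omega)
    · rintro ⟨h0, hfar⟩
      have hl1 : lo - 1 < hs.length := by omega
      rw [List.getD_eq_getElem hs 0 hl1] at hfar
      have hh : hs[lo - 1] < house := hlt (lo - 1) (by omega) hl1
      exact hno hs[lo - 1] (List.getElem_mem hl1) (by rw [abs_of_nonneg (by omega)]; omega)

theorem pvLoopHousesB_eq (r : Int) (hs houses : List Int) :
    pvLoopHousesB r hs houses = houses.all (pvCheckHouseB r hs) := by
  induction houses with
  | nil => rfl
  | cons h t ih =>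
    simp only [pvLoopHousesB, List.all_cons]
    cases hc : pvCheckHouseB r hs h <;> simp only [hc, Bool.not_true, Bool.not_false, if_pos, if_neg, Bool.true_and, Bool.false_and, ih] <;> rfl

-- ===== VERDICT (by name: the statement is the Claim_ definition above) =====
theorem is_valid_radius_my_TLE_spec : Claim_unchanged_is_valid_radius_my_TLE := by
  intro r houses heaters _hdom hnd
  by_cases hne : heaters = []
  · subst hne
    have hh : houses = [] := by
      by_contra hcon
      exact hnd ⟨rfl, hcon⟩
    subst hh
    rfl
  · set hs := PySem.List.sorted heaters (fun x => x) false with hhs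
    have hsort : hs.Pairwise (· ≤ ·) := PySem.List.sorted_pairwise heaters (fun x => x)
    have hperm : hs.Perm heaters := PySem.List.sorted_perm heaters (fun x => x) false
    show pvLoopHousesA r heaters houses = pvLoopHousesB r hs houses
    rw [pvLoopHousesA_eq r heaters hne houses, pvLoopHousesB_eq]
    have hfun : ∀ h, pvCheckHouseB r hs h = heaters.any (fun k => decide (|h - k| ≤ r)) := by
      intro h
      rw [pvCheckHouseB_iff r h hs hsort]
      exact hperm.any_eq
    rw [funext hfun]

theorem is_valid_radius_my_TLE_changed : Claim_changed_is_valid_radius_my_TLE := by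
  unfold Claim_changed_is_valid_radius_my_TLE
  refine ⟨by decide, by decide, by decide, ?_, by decide⟩
  show is_valid_radius_my_TLE_alt 0 [1] [] = false
  simp [is_valid_radius_my_TLE_alt, PySem.List.sorted, pvLoopHousesB, pvCheckHouseB, pvBisectB]

theorem is_valid_radius_my_TLE_tight : Claim_exact_is_valid_radius_my_TLE := by
  intro r houses heaters _hdom hd
  obtain ⟨hh, hne⟩ := hd
  subst hh
  cases houses with
  | nil => exact absurd rfl hne
  | cons h t =>
    rw [show is_valid_radius_my_TLE r (h :: t) [] = true from pvLoopHousesA_nil r (h :: t)]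
    simp [is_valid_radius_my_TLE_alt, PySem.List.sorted, pvLoopHousesB, pvCheckHouseB, pvBisectB]
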